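-- pv_equiv track=rewrite | github.com/rich-language-failure-recovery/RACER-DataGen | racer_datagen/utils/gif_utils.py | find_number_after_last_underscore
-- ===== SOURCE A (Python) =====
-- def find_number_after_last_underscore(s):
--     parts = s.rsplit('_', 1)
--     if len(parts) > 1:
--         number_str = parts[1]
--         number = ''
--         for char in number_str:
--             if char.isdigit():
--                 number += char
--             else:
--                 break
--         if number:
--             return int(number)
--     return None
-- ===== SOURCE B (Python) =====
-- def find_number_after_last_underscore(s):
--     # One forward pass: restart the digit buffer at every underscore, keep the run
--     # of digits immediately following the most recent underscore.
--     num = None      # digits seen right after the most recent underscore (None: none yet)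
--     run = False     # still inside the leading digit run of that segment
--     for c in s:
--         if c == '_':
--             num, run = '', True
--         elif run:
--             if c.isdigit():
--                 num += c
--             else:
--                 run = False
--     return int(num) if num else None
-- ===== Notes on version B (the rewrite author's own statement) =====
-- stated objective: alternative
-- what changed: Replaces rsplit-at-the-last-underscore followed by a digit-collecting loop over the tail with a single forward state-machine pass over the whole string that resets its digit buffer at each underscore.
import Mathlib
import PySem

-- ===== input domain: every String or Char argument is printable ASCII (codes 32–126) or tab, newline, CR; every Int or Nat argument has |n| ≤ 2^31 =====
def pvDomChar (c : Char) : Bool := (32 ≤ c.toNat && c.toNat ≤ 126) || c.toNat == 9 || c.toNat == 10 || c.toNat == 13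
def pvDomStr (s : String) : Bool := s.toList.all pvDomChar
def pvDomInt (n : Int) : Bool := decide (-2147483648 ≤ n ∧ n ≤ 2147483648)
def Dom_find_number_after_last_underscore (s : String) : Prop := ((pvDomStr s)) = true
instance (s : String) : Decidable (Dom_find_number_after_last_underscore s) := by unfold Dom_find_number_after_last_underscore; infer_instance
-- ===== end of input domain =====

-- ===== PORT A =====
-- B replaces rsplit+tail-loop by a one-pass state machine; objective: alternative (same cost).

-- hand port of s.rsplit('_', 1) (PySem has no rsplit): exact — one split at the LAST '_'
def pvRsplitOne : List Char → List (List Char)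
  | [] => [[]]
  | c :: rest =>
    match pvRsplitOne rest with
    | [only] => if c = '_' then [[], only] else [(c :: only)]
    | a :: b => (c :: a) :: b
    | [] => []

-- A's character loop: append digits, break at the first non-digit
def pvCollect : List Char → List Char
  | [] => []
  | c :: rest => if PySem.Chars.isdigit c then c :: pvCollect rest else []

def find_number_after_last_underscore (s : String) : Option Int :=
  match pvRsplitOne s.toList with
  | [_, number_str] =>                    -- len(parts) > 1; number_str = parts[1]
    let number := pvCollect number_str
    if number ≠ [] then PySem.Int.ofChars? number else none   -- int() never raises on a digit run
  | _ => none

-- ===== PORT B =====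
def pvAltStep (st : Option (List Char) × Bool) (c : Char) : Option (List Char) × Bool :=
  if c = '_' then (some [], true)
  else
    match st with
    | (some ds, true) =>
      if PySem.Chars.isdigit c then (some (ds ++ [c]), true) else (some ds, false)
    | st => st

def find_number_after_last_underscore_alt (s : String) : Option Int :=
  match (s.toList.foldl pvAltStep (none, false)).1 with
  | some num => if num ≠ [] then PySem.Int.ofChars? num else none   -- int(num) if num else None
  | none => none

-- ===== PRECONDITION & SPEC =====
def Spec_find_number_after_last_underscore (s : String) (out : Option Int) : Prop := out = find_number_after_last_underscore_alt s
instance (s : String) (out : Option Int) : Decidable (Spec_find_number_after_last_underscore s out) := by unfold Spec_find_number_after_last_underscore; infer_instance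

-- ===== CLAIM (what is proved, stated in full; the proofs are below) =====
def Claim_equal_find_number_after_last_underscore : Prop := ∀ (s : String), Dom_find_number_after_last_underscore s → Spec_find_number_after_last_underscore s (find_number_after_last_underscore s)

-- ===== LEMMAS AND PROOFS =====

theorem pvRsplitOne_no_us (l : List Char) (h : '_' ∉ l) : pvRsplitOne l = [l] := by
  induction l with
  | nil => rfl
  | cons c rest ih =>
    simp only [List.mem_cons, not_or] at h
    rw [pvRsplitOne, ih h.2]
    simp [Ne.symm h.1]

theorem pvRsplitOne_us (l : List Char) (h : '_' ∈ l) :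
    ∃ a b, pvRsplitOne l = [a, b] ∧ l = a ++ '_' :: b ∧ '_' ∉ b := by
  induction l with
  | nil => simp at h
  | cons c rest ih =>
    by_cases hr : '_' ∈ rest
    · obtain ⟨a, b, h1, h2, h3⟩ := ih hr
      exact ⟨c :: a, b, by simp [pvRsplitOne, h1], by simp [h2], h3⟩
    · have hc : c = '_' := by
        rcases List.mem_cons.mp h with h | h
        · exact h.symm
        · exact absurd h hr
      exact ⟨[], rest, by simp [pvRsplitOne, pvRsplitOne_no_us rest hr, hc], by simp [hc], hr⟩

theorem foldl_closed (b : List Char) (hb : '_' ∉ b) (ds : List Char) :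
    b.foldl pvAltStep (some ds, false) = (some ds, false) := by
  induction b with
  | nil => rfl
  | cons c rest ih =>
    simp only [List.mem_cons, not_or] at hb
    simp only [List.foldl_cons, pvAltStep, if_neg (Ne.symm hb.1)]
    exact ih hb.2

theorem foldl_none (b : List Char) (hb : '_' ∉ b) :
    b.foldl pvAltStep (none, false) = (none, false) := by
  induction b with
  | nil => rfl
  | cons c rest ih =>
    simp only [List.mem_cons, not_or] at hb
    simp only [List.foldl_cons, pvAltStep, if_neg (Ne.symm hb.1)]
    exact ih hb.2

theorem foldl_open (b : List Char) (hb : '_' ∉ b) (ds : List Char) :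
    (b.foldl pvAltStep (some ds, true)).1 = some (ds ++ pvCollect b) := by
  induction b generalizing ds with
  | nil => simp [pvCollect]
  | cons c rest ih =>
    simp only [List.mem_cons, not_or] at hb
    by_cases hd : PySem.Chars.isdigit c = true
    · simp only [List.foldl_cons, pvAltStep, if_neg (Ne.symm hb.1), hd, if_true, pvCollect]
      rw [ih hb.2]
      simp
    · simp only [List.foldl_cons, pvAltStep, if_neg (Ne.symm hb.1), hd, pvCollect,
        Bool.false_eq_true, if_false]
      rw [foldl_closed rest hb.2]
      simp

-- ===== VERDICT (by name: the statement is the Claim_ definition above) =====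
theorem find_number_after_last_underscore_spec : Claim_equal_find_number_after_last_underscore := by
  intro s _
  unfold Spec_find_number_after_last_underscore
  unfold find_number_after_last_underscore find_number_after_last_underscore_alt
  by_cases h : '_' ∈ s.toList
  · obtain ⟨a, b, h1, h2, h3⟩ := pvRsplitOne_us s.toList h
    rw [h1, h2, List.foldl_append, List.foldl_cons]
    have hstep : ∀ st : Option (List Char) × Bool, pvAltStep st '_' = (some [], true) := by
      intro st; simp [pvAltStep]
    rw [hstep, foldl_open b h3 []]
    simp
  · rw [pvRsplitOne_no_us s.toList h, foldl_none s.toList h]
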